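-- pv_equiv track=rewrite | github.com/981377660LMT/algorithm-study | 11_动态规划/dp分类/有限状态dp/字符串/字符串中的red.py | countRed
-- ===== SOURCE A (Python) =====
-- MOD = int(1e9 + 7)
--
-- def countRed(n: int) -> int:
--     dp = [1, 0, 0, 0, 0, 0, 0]
--     for _ in range(n):
--         ndp = [0] * 7
--         ndp[0] = (dp[0] * 25 + dp[1] * 24 + dp[2] * 24) % MOD
--         ndp[1] = (dp[0] + dp[1] + dp[2]) % MOD
--         ndp[2] = dp[1]
--         ndp[3] = (dp[2] + dp[3] * 25 + dp[4] * 24 + dp[5] * 24) % MOD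
--         ndp[4] = (dp[3] + dp[4] + dp[5]) % MOD
--         ndp[5] = dp[4]
--         ndp[6] = (dp[5] + dp[6] * 26) % MOD
--         dp = ndp
--     return dp[-1]
-- ===== SOURCE B (Python) =====
-- MOD = int(1e9 + 7)
--
-- _M = [
--     [25, 24, 24, 0, 0, 0, 0],
--     [1, 1, 1, 0, 0, 0, 0],
--     [0, 1, 0, 0, 0, 0, 0],
--     [0, 0, 1, 25, 24, 24, 0],
--     [0, 0, 0, 1, 1, 1, 0],
--     [0, 0, 0, 0, 1, 0, 0],
--     [0, 0, 0, 0, 0, 1, 26],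
-- ]
--
-- def _mul(A, B):
--     return [[sum(A[i][k] * B[k][j] for k in range(7)) % MOD for j in range(7)]
--             for i in range(7)]
--
-- def _matpow(k):
--     if k == 0:
--         return [[1 if i == j else 0 for j in range(7)] for i in range(7)]
--     H = _matpow(k // 2)
--     H2 = _mul(H, H)
--     return H2 if k % 2 == 0 else _mul(H2, _M)
--
-- def countRed(n: int) -> int:
--     k = n if n > 0 else 0
--     P = _matpow(k)
--     # answer = (M^k applied to the unit start vector e0)[6] = P[6][0]
--     return P[6][0]
-- ===== Notes on version B (the rewrite author's own statement) =====
-- stated objective: faster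
-- what changed: Replaces A's n-iteration linear dp loop by binary exponentiation of the fixed seven-state transition matrix mod 1e9+7, reading the answer off the matrix power's last-row/first-column entry.
import Mathlib
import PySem

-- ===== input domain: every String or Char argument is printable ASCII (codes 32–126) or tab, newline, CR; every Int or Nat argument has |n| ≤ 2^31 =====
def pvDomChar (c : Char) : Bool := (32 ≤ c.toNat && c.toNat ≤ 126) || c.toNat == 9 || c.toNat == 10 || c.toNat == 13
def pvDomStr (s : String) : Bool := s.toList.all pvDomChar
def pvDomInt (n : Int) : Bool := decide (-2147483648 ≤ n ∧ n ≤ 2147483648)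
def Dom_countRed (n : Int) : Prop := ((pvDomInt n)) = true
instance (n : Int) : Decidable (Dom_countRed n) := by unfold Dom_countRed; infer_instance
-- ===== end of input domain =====

-- B replaces A's linear dp loop by binary exponentiation of the fixed seven-state transition matrix mod 1e9+7 (objective: faster; measured).

-- ===== PORT A =====
-- one loop iteration of A: dp -> ndp (the seven assignments, in order)
def stepA (dp : List Int) : List Int :=
  [ PySem.Int.mod (PySem.List.pyGetD dp 0 0 * 25 + PySem.List.pyGetD dp 1 0 * 24 + PySem.List.pyGetD dp 2 0 * 24) 1000000007
  , PySem.Int.mod (PySem.List.pyGetD dp 0 0 + PySem.List.pyGetD dp 1 0 + PySem.List.pyGetD dp 2 0) 1000000007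
  , PySem.List.pyGetD dp 1 0
  , PySem.Int.mod (PySem.List.pyGetD dp 2 0 + PySem.List.pyGetD dp 3 0 * 25 + PySem.List.pyGetD dp 4 0 * 24 + PySem.List.pyGetD dp 5 0 * 24) 1000000007
  , PySem.Int.mod (PySem.List.pyGetD dp 3 0 + PySem.List.pyGetD dp 4 0 + PySem.List.pyGetD dp 5 0) 1000000007
  , PySem.List.pyGetD dp 4 0
  , PySem.Int.mod (PySem.List.pyGetD dp 5 0 + PySem.List.pyGetD dp 6 0 * 26) 1000000007 ]

def countRed (n : Int) : Int :=
  let dp := (PySem.List.pyRange 0 n 1).foldl (fun dp _ => stepA dp) [1, 0, 0, 0, 0, 0, 0]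
  PySem.List.pyGetD dp (-1) 0

-- ===== PORT B =====
-- the fixed transition matrix (row i, column j = coefficient of dp[j] in ndp[i])
def matB : List (List Int) :=
  [ [25, 24, 24, 0, 0, 0, 0]
  , [1, 1, 1, 0, 0, 0, 0]
  , [0, 1, 0, 0, 0, 0, 0]
  , [0, 0, 1, 25, 24, 24, 0]
  , [0, 0, 0, 1, 1, 1, 0]
  , [0, 0, 0, 0, 1, 0, 0]
  , [0, 0, 0, 0, 0, 1, 26] ]

-- _mul: 7x7 matrix product, each entry reduced mod 1e9+7
def mulB (A B : List (List Int)) : List (List Int) :=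
  (PySem.List.pyRange 0 7 1).map (fun i =>
    (PySem.List.pyRange 0 7 1).map (fun j =>
      PySem.Int.mod
        ((PySem.List.pyRange 0 7 1).foldl
          (fun s k => s + PySem.List.pyGetD (PySem.List.pyGetD A i []) k 0 *
                          PySem.List.pyGetD (PySem.List.pyGetD B k []) j 0) 0)
        1000000007))

-- _matpow: binary exponentiation (recursion on k // 2)
def matpowB (k : Nat) : List (List Int) :=
  if k = 0 then
    (PySem.List.pyRange 0 7 1).map (fun i =>
      (PySem.List.pyRange 0 7 1).map (fun j => if i = j then 1 else 0))
  else
    let H := matpowB (k / 2)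
    let H2 := mulB H H
    if k % 2 = 0 then H2 else mulB H2 matB
decreasing_by exact Nat.div_lt_self (Nat.pos_of_ne_zero (by assumption)) (by omega)

def countRed_alt (n : Int) : Int :=
  let k := (if 0 < n then n else 0).toNat
  let P := matpowB k
  PySem.List.pyGetD (PySem.List.pyGetD P 6 []) 0 0

-- ===== PRECONDITION & SPEC =====
def Spec_countRed (n : Int) (out : Int) : Prop := out = countRed_alt n
instance (n : Int) (out : Int) : Decidable (Spec_countRed n out) := by unfold Spec_countRed; infer_instance

-- ===== CLAIM (what is proved, stated in full; the proofs are below) =====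
def Claim_equal_countRed : Prop := ∀ (n : Int), Dom_countRed n → Spec_countRed n (countRed n)

-- ===== LEMMAS AND PROOFS =====

-- abstraction layer: matrices over ZMod (10^9+7)
abbrev ZM : Type := ZMod 1000000007

def Mz : Matrix (Fin 7) (Fin 7) ZM :=
  fun i j => (((matB.getD i []).getD j 0 : Int) : ZM)

-- a 7x7 Int list matrix realises Q: entries reduced mod 1e9+7 and congruent to Q
def Rmat (P : List (List Int)) (Q : Matrix (Fin 7) (Fin 7) ZM) : Prop :=
  ∀ i j : Fin 7,
    (0 ≤ (P.getD i []).getD j 0 ∧ (P.getD i []).getD j 0 < 1000000007) ∧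
    (((P.getD i []).getD j 0 : Int) : ZM) = Q i j

-- a 7-entry Int dp list realises the vector v
def Rvec (dp : List Int) (v : Fin 7 → ZM) : Prop :=
  dp.length = 7 ∧
  ∀ i : Fin 7,
    (0 ≤ dp.getD i 0 ∧ dp.getD i 0 < 1000000007) ∧
    ((dp.getD i 0 : Int) : ZM) = v i

def e0 : Fin 7 → ZM := fun j => if j = 0 then 1 else 0

theorem cast_int_mod (a : Int) :
    ((PySem.Int.mod a 1000000007 : Int) : ZM) = ((a : Int) : ZM) := by
  rw [PySem.Int.mod_eq_emod_of_pos (by norm_num : (0:Int) < 1000000007)]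
  exact_mod_cast ZMod.intCast_mod a 1000000007

theorem mod_bounds (a : Int) :
    0 ≤ PySem.Int.mod a 1000000007 ∧ PySem.Int.mod a 1000000007 < 1000000007 :=
  ⟨PySem.Int.mod_nonneg a (by norm_num), PySem.Int.mod_lt a (by norm_num)⟩

theorem int_eq_of_cast_eq {a b : Int} (ha : 0 ≤ a ∧ a < 1000000007)
    (hb : 0 ≤ b ∧ b < 1000000007) (h : ((a : Int) : ZM) = ((b : Int) : ZM)) : a = b := by
  have h2 : a ≡ b [ZMOD (1000000007 : Nat)] := by
    rw [← ZMod.intCast_eq_intCast_iff]; exact_mod_cast h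
  have h3 : a % (1000000007 : Int) = b % (1000000007 : Int) := by exact_mod_cast h2
  omega

-- entry of mulB at in-range indices
theorem mulB_entry (A B : List (List Int)) (i j : Fin 7) :
    ((mulB A B).getD i []).getD j 0 =
      PySem.Int.mod
        ((PySem.List.pyRange 0 7 1).foldl
          (fun s k => s + PySem.List.pyGetD (PySem.List.pyGetD A (i : Int) []) k 0 *
                          PySem.List.pyGetD (PySem.List.pyGetD B k []) (j : Int) 0) 0)
        1000000007 := by
  fin_cases i <;> fin_cases j <;> rfl

theorem mulB_ok {A B : List (List Int)} {Qa Qb : Matrix (Fin 7) (Fin 7) ZM}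
    (hA : Rmat A Qa) (hB : Rmat B Qb) : Rmat (mulB A B) (Qa * Qb) := by
  intro i j
  rw [mulB_entry]
  refine ⟨mod_bounds _, ?_⟩
  rw [cast_int_mod, Matrix.mul_apply, Fin.sum_univ_seven]
  have hr : PySem.List.pyRange 0 7 1 = [0, 1, 2, 3, 4, 5, 6] := rfl
  rw [hr]
  simp only [List.foldl, PySem.List.pyGetD_natCast,
    PySem.List.pyGetD_of_nonneg _ _ (by norm_num : (0:Int) ≤ 0),
    PySem.List.pyGetD_of_nonneg _ _ (by norm_num : (0:Int) ≤ 1),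
    PySem.List.pyGetD_of_nonneg _ _ (by norm_num : (0:Int) ≤ 2),
    PySem.List.pyGetD_of_nonneg _ _ (by norm_num : (0:Int) ≤ 3),
    PySem.List.pyGetD_of_nonneg _ _ (by norm_num : (0:Int) ≤ 4),
    PySem.List.pyGetD_of_nonneg _ _ (by norm_num : (0:Int) ≤ 5),
    PySem.List.pyGetD_of_nonneg _ _ (by norm_num : (0:Int) ≤ 6)]
  push_cast
  have a0 : (((A.getD (↑i) []).getD 0 0 : Int) : ZM) = Qa i 0 := (hA i 0).2
  have a1 : (((A.getD (↑i) []).getD 1 0 : Int) : ZM) = Qa i 1 := (hA i 1).2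
  have a2 : (((A.getD (↑i) []).getD 2 0 : Int) : ZM) = Qa i 2 := (hA i 2).2
  have a3 : (((A.getD (↑i) []).getD 3 0 : Int) : ZM) = Qa i 3 := (hA i 3).2
  have a4 : (((A.getD (↑i) []).getD 4 0 : Int) : ZM) = Qa i 4 := (hA i 4).2
  have a5 : (((A.getD (↑i) []).getD 5 0 : Int) : ZM) = Qa i 5 := (hA i 5).2
  have a6 : (((A.getD (↑i) []).getD 6 0 : Int) : ZM) = Qa i 6 := (hA i 6).2
  have b0 : (((B.getD 0 []).getD (↑j) 0 : Int) : ZM) = Qb 0 j := (hB 0 j).2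
  have b1 : (((B.getD 1 []).getD (↑j) 0 : Int) : ZM) = Qb 1 j := (hB 1 j).2
  have b2 : (((B.getD 2 []).getD (↑j) 0 : Int) : ZM) = Qb 2 j := (hB 2 j).2
  have b3 : (((B.getD 3 []).getD (↑j) 0 : Int) : ZM) = Qb 3 j := (hB 3 j).2
  have b4 : (((B.getD 4 []).getD (↑j) 0 : Int) : ZM) = Qb 4 j := (hB 4 j).2
  have b5 : (((B.getD 5 []).getD (↑j) 0 : Int) : ZM) = Qb 5 j := (hB 5 j).2
  have b6 : (((B.getD 6 []).getD (↑j) 0 : Int) : ZM) = Qb 6 j := (hB 6 j).2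
  rw [a0, a1, a2, a3, a4, a5, a6, b0, b1, b2, b3, b4, b5, b6]
  ring

theorem matB_ok : Rmat matB Mz := by unfold Rmat; decide

theorem matpowB_ok : ∀ k : Nat, Rmat (matpowB k) (Mz ^ k) := by
  intro k
  induction k using Nat.strong_induction_on with
  | _ k ih =>
    rw [matpowB]
    by_cases hk : k = 0
    · subst hk
      rw [if_pos rfl, pow_zero]
      unfold Rmat
      decide
    · rw [if_neg hk]
      have hH := ih (k / 2) (Nat.div_lt_self (Nat.pos_of_ne_zero hk) (by omega))
      by_cases he : k % 2 = 0
      · rw [if_pos he]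
        have hpow : Mz ^ k = Mz ^ (k / 2) * Mz ^ (k / 2) := by
          rw [← pow_add]; congr 1; omega
        rw [hpow]; exact mulB_ok hH hH
      · rw [if_neg he]
        have hpow : Mz ^ k = Mz ^ (k / 2) * Mz ^ (k / 2) * Mz := by
          rw [← pow_add, ← pow_succ]; congr 1; omega
        rw [hpow]; exact mulB_ok (mulB_ok hH hH) matB_ok

theorem list7 (l : List Int) (h : l.length = 7) :
    ∃ a b c d e f g : Int, l = [a, b, c, d, e, f, g] := by
  match l, h with
  | [a, b, c, d, e, f, g], _ => exact ⟨a, b, c, d, e, f, g, rfl⟩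
  | [], h => simp at h
  | [_], h => simp at h
  | [_, _], h => simp at h
  | [_, _, _], h => simp at h
  | [_, _, _, _], h => simp at h
  | [_, _, _, _, _], h => simp at h
  | [_, _, _, _, _, _], h => simp at h
  | _ :: _ :: _ :: _ :: _ :: _ :: _ :: _ :: t, h => simp at h

theorem stepA_eq (a b c d e f g : Int) :
    stepA [a, b, c, d, e, f, g] =
      [ PySem.Int.mod (a * 25 + b * 24 + c * 24) 1000000007
      , PySem.Int.mod (a + b + c) 1000000007
      , b
      , PySem.Int.mod (c + d * 25 + e * 24 + f * 24) 1000000007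
      , PySem.Int.mod (d + e + f) 1000000007
      , e
      , PySem.Int.mod (f + g * 26) 1000000007 ] := rfl

-- one dp step realises multiplication by Mz
theorem stepA_ok {dp : List Int} {v : Fin 7 → ZM} (h : Rvec dp v) :
    Rvec (stepA dp) (Mz.mulVec v) := by
  obtain ⟨hlen, hv⟩ := h
  obtain ⟨a, b, c, d, e, f, g, rfl⟩ := list7 dp hlen
  have Ha : ((a : Int) : ZM) = v 0 := (hv 0).2
  have Hb : ((b : Int) : ZM) = v 1 := (hv 1).2
  have Hc : ((c : Int) : ZM) = v 2 := (hv 2).2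
  have Hd : ((d : Int) : ZM) = v 3 := (hv 3).2
  have He : ((e : Int) : ZM) = v 4 := (hv 4).2
  have Hf : ((f : Int) : ZM) = v 5 := (hv 5).2
  have Hg : ((g : Int) : ZM) = v 6 := (hv 6).2
  have mv : ∀ i : Fin 7, Mz.mulVec v i =
      Mz i 0 * v 0 + Mz i 1 * v 1 + Mz i 2 * v 2 + Mz i 3 * v 3 +
      Mz i 4 * v 4 + Mz i 5 * v 5 + Mz i 6 * v 6 := by
    intro i; rw [Matrix.mulVec, dotProduct, Fin.sum_univ_seven]
  rw [stepA_eq]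
  refine ⟨rfl, ?_⟩
  intro i
  fin_cases i
  · refine ⟨mod_bounds _, ?_⟩
    show ((PySem.Int.mod (a * 25 + b * 24 + c * 24) 1000000007 : Int) : ZM) = Mz.mulVec v 0
    rw [mv 0, cast_int_mod]
    push_cast
    rw [Ha, Hb, Hc]
    show _ = ((25 : Int) : ZM) * v 0 + ((24 : Int) : ZM) * v 1 + ((24 : Int) : ZM) * v 2 +
      ((0 : Int) : ZM) * v 3 + ((0 : Int) : ZM) * v 4 + ((0 : Int) : ZM) * v 5 + ((0 : Int) : ZM) * v 6
    push_cast
    ring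
  · refine ⟨mod_bounds _, ?_⟩
    show ((PySem.Int.mod (a + b + c) 1000000007 : Int) : ZM) = Mz.mulVec v 1
    rw [mv 1, cast_int_mod]
    push_cast
    rw [Ha, Hb, Hc]
    show _ = ((1 : Int) : ZM) * v 0 + ((1 : Int) : ZM) * v 1 + ((1 : Int) : ZM) * v 2 +
      ((0 : Int) : ZM) * v 3 + ((0 : Int) : ZM) * v 4 + ((0 : Int) : ZM) * v 5 + ((0 : Int) : ZM) * v 6
    push_cast
    ring
  · refine ⟨(hv 1).1, ?_⟩
    show ((b : Int) : ZM) = Mz.mulVec v 2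
    rw [mv 2]
    rw [Hb]
    show _ = ((0 : Int) : ZM) * v 0 + ((1 : Int) : ZM) * v 1 + ((0 : Int) : ZM) * v 2 +
      ((0 : Int) : ZM) * v 3 + ((0 : Int) : ZM) * v 4 + ((0 : Int) : ZM) * v 5 + ((0 : Int) : ZM) * v 6
    push_cast
    ring
  · refine ⟨mod_bounds _, ?_⟩
    show ((PySem.Int.mod (c + d * 25 + e * 24 + f * 24) 1000000007 : Int) : ZM) = Mz.mulVec v 3
    rw [mv 3, cast_int_mod]
    push_cast
    rw [Hc, Hd, He, Hf]
    show _ = ((0 : Int) : ZM) * v 0 + ((0 : Int) : ZM) * v 1 + ((1 : Int) : ZM) * v 2 +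
      ((25 : Int) : ZM) * v 3 + ((24 : Int) : ZM) * v 4 + ((24 : Int) : ZM) * v 5 + ((0 : Int) : ZM) * v 6
    push_cast
    ring
  · refine ⟨mod_bounds _, ?_⟩
    show ((PySem.Int.mod (d + e + f) 1000000007 : Int) : ZM) = Mz.mulVec v 4
    rw [mv 4, cast_int_mod]
    push_cast
    rw [Hd, He, Hf]
    show _ = ((0 : Int) : ZM) * v 0 + ((0 : Int) : ZM) * v 1 + ((0 : Int) : ZM) * v 2 +
      ((1 : Int) : ZM) * v 3 + ((1 : Int) : ZM) * v 4 + ((1 : Int) : ZM) * v 5 + ((0 : Int) : ZM) * v 6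
    push_cast
    ring
  · refine ⟨(hv 4).1, ?_⟩
    show ((e : Int) : ZM) = Mz.mulVec v 5
    rw [mv 5]
    rw [He]
    show _ = ((0 : Int) : ZM) * v 0 + ((0 : Int) : ZM) * v 1 + ((0 : Int) : ZM) * v 2 +
      ((0 : Int) : ZM) * v 3 + ((1 : Int) : ZM) * v 4 + ((0 : Int) : ZM) * v 5 + ((0 : Int) : ZM) * v 6
    push_cast
    ring
  · refine ⟨mod_bounds _, ?_⟩
    show ((PySem.Int.mod (f + g * 26) 1000000007 : Int) : ZM) = Mz.mulVec v 6
    rw [mv 6, cast_int_mod]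
    push_cast
    rw [Hf, Hg]
    show _ = ((0 : Int) : ZM) * v 0 + ((0 : Int) : ZM) * v 1 + ((0 : Int) : ZM) * v 2 +
      ((0 : Int) : ZM) * v 3 + ((0 : Int) : ZM) * v 4 + ((1 : Int) : ZM) * v 5 + ((26 : Int) : ZM) * v 6
    push_cast
    ring

theorem iterA_ok : ∀ m : Nat, Rvec (stepA^[m] [1, 0, 0, 0, 0, 0, 0]) ((Mz ^ m).mulVec e0) := by
  intro m
  induction m with
  | zero =>
    rw [Function.iterate_zero, id_eq, pow_zero, Matrix.one_mulVec]
    unfold Rvec e0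
    decide
  | succ m ih =>
    rw [Function.iterate_succ_apply', pow_succ']
    have h := stepA_ok ih
    rwa [Matrix.mulVec_mulVec] at h

theorem foldl_stepA (l : List Int) (d : List Int) :
    l.foldl (fun dp _ => stepA dp) d = stepA^[l.length] d := by
  induction l generalizing d with
  | nil => rfl
  | cons x xs ih => simp [List.foldl, ih, Function.iterate_succ_apply]

theorem mulVec_e0 (Q : Matrix (Fin 7) (Fin 7) ZM) (i : Fin 7) : Q.mulVec e0 i = Q i 0 := by
  rw [Matrix.mulVec, dotProduct, Fin.sum_univ_seven]
  simp [e0]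

-- ===== VERDICT (by name: the statement is the Claim_ definition above) =====
theorem countRed_spec : Claim_equal_countRed := by
  intro n _
  unfold Spec_countRed countRed countRed_alt
  have hk : (if 0 < n then n else 0).toNat = n.toNat := by split <;> omega
  rw [hk]
  have hlen : (PySem.List.pyRange 0 n 1).length = n.toNat := by
    by_cases hn : 0 ≤ n
    · rw [show n = ((n.toNat : Nat) : Int) by omega, PySem.List.pyRange_zero_natCast]
      simp
      omega
    · have hn' : n < 0 := by omega
      have h0 : PySem.List.pyRange 0 n 1 = [] := by
        unfold PySem.List.pyRange
        split <;> simp_all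
        omega
      rw [h0]
      simp
      omega
  rw [foldl_stepA, hlen]
  obtain ⟨hdlen, hdv⟩ := iterA_ok n.toNat
  have hB := matpowB_ok n.toNat
  set dp := stepA^[n.toNat] [1, 0, 0, 0, 0, 0, 0] with hdp
  have hne : dp ≠ [] := by intro h; rw [h] at hdlen; simp at hdlen
  have hneg : PySem.List.pyGetD dp (-1) 0 = dp.getD 6 0 := by
    have h1 : PySem.List.pyGetD dp (-1) 0 = dp.getLast hne := PySem.List.pyGetD_neg_one dp 0 hne
    rw [h1, List.getLast_eq_getElem, List.getD_eq_getElem?_getD,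
        List.getElem?_eq_getElem (by omega)]
    simp [hdlen]
  rw [hneg]
  show dp.getD 6 0 = PySem.List.pyGetD (PySem.List.pyGetD (matpowB n.toNat) 6 []) 0 0
  rw [PySem.List.pyGetD_of_nonneg _ _ (by norm_num : (0:Int) ≤ 6),
      PySem.List.pyGetD_of_nonneg _ _ (by norm_num : (0:Int) ≤ 0)]
  have bA : 0 ≤ dp.getD 6 0 ∧ dp.getD 6 0 < 1000000007 := (hdv 6).1
  have bB : 0 ≤ ((matpowB n.toNat).getD (6:Int).toNat []).getD (0:Int).toNat 0 ∧
      ((matpowB n.toNat).getD (6:Int).toNat []).getD (0:Int).toNat 0 < 1000000007 := (hB 6 0).1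
  refine int_eq_of_cast_eq bA bB ?_
  have cA : ((dp.getD 6 0 : Int) : ZM) = ((Mz ^ n.toNat).mulVec e0) 6 := (hdv 6).2
  have cB : ((((matpowB n.toNat).getD (6:Int).toNat []).getD (0:Int).toNat 0 : Int) : ZM) =
      (Mz ^ n.toNat) 6 0 := (hB 6 0).2
  rw [cA, cB, mulVec_e0]
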